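-- pv_equiv track=rewrite | github.com/hypnotes/BOJ | goldpy/dp/17609palindrome.py | check
-- ===== SOURCE A (Python) =====
-- def check(a, flag):
--     alen = len(a)
--     for i in range(alen//2):
--
--         if a[i] != a[alen-i-1]:
--             if not flag:
--                 b = a[:i] + a[i+1:]
--                 c = a[:alen-i-1]+a[alen-i:]
--                 if check(b, 1)!=2:
--                     return 1
--                 elif check(c, 1)!=2:
--                     return 1
--                 else:
--                     return 2
--             else:
--                 return 2
--
--     return flag
-- ===== SOURCE B (Python) =====
-- def is_pal(a, lo, hi):
--     while lo < hi:
--         if a[lo] != a[hi]: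
--             return False
--         lo += 1
--         hi -= 1
--     return True
--
--
-- def check(a, flag):
--     lo, hi = 0, len(a) - 1
--     while lo < hi:
--         if a[lo] != a[hi]:
--             if not flag:
--                 return 1 if is_pal(a, lo + 1, hi) or is_pal(a, lo, hi - 1) else 2
--             return 2
--         lo += 1
--         hi -= 1
--     return flag
-- ===== Notes on version B (the rewrite author's own statement) =====
-- stated objective: simpler
-- what changed: Replaces A's self-recursion on freshly-built sliced copies (a[:i]+a[i+1:]) with an iterative two-pointer scan plus an index-window helper is_pal(a,lo,hi), so no string copies and no recursion; the raw flag value is still returned verbatim on a full match.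
import Mathlib
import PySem

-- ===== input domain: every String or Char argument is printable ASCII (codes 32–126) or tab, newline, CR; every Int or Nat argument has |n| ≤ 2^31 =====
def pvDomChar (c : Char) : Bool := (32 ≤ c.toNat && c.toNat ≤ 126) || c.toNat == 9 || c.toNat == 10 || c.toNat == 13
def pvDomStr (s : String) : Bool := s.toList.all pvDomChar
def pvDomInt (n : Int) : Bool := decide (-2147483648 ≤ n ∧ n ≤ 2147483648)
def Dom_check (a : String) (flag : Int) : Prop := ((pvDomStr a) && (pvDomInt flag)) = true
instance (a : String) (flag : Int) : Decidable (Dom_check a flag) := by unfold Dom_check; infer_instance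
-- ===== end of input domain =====

-- ===== PORT A =====
-- B changes: iterative two-pointer scan with an index-window palindrome helper instead of
-- self-recursion on sliced string copies (objective: simpler; return value only).
-- Indexing a[i] and the slices use provably in-range nonnegative indices, so List.getD /
-- take / drop are exact here.  The Nat `fuel` argument is only a structural-termination
-- guard; it is always large enough for the loop to finish on its own condition.
def checkLoop : Nat → List Char → Int → Nat → Int
  | 0, _, flag, _ => flag
  | fuel + 1, l, flag, i =>
    if i < l.length / 2 then
      if l.getD i ' ' ≠ l.getD (l.length - i - 1) ' ' then
        if flag = 0 then
          -- b = a[:i] + a[i+1:], c = a[:alen-i-1] + a[alen-i:] inlined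
          if checkLoop fuel (l.take i ++ l.drop (i + 1)) 1 0 ≠ 2 then 1
          else if checkLoop fuel (l.take (l.length - i - 1) ++ l.drop (l.length - i)) 1 0 ≠ 2
            then 1
          else 2
        else 2
      else checkLoop fuel l flag (i + 1)
    else flag

def check (a : String) (flag : Int) : Int :=
  checkLoop (a.toList.length + 1) a.toList flag 0

-- ===== PORT B =====
def isPal : Nat → List Char → Nat → Nat → Bool
  | 0, _, _, _ => true
  | fuel + 1, l, lo, hi =>
    if lo < hi then
      if l.getD lo ' ' ≠ l.getD hi ' ' then false
      else isPal fuel l (lo + 1) (hi - 1)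
    else true

def altLoop : Nat → List Char → Int → Nat → Nat → Int
  | 0, _, flag, _, _ => flag
  | fuel + 1, l, flag, lo, hi =>
    if lo < hi then
      if l.getD lo ' ' ≠ l.getD hi ' ' then
        if flag = 0 then
          if isPal (hi - (lo + 1) + 1) l (lo + 1) hi || isPal (hi - 1 - lo + 1) l lo (hi - 1)
            then 1 else 2
        else 2
      else altLoop fuel l flag (lo + 1) (hi - 1)
    else flag

def check_alt (a : String) (flag : Int) : Int :=
  altLoop (a.toList.length / 2 + 1) a.toList flag 0 (a.toList.length - 1)

-- ===== PRECONDITION & SPEC =====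
def Spec_check (a : String) (flag : Int) (out : Int) : Prop := out = check_alt a flag
instance (a : String) (flag : Int) (out : Int) : Decidable (Spec_check a flag out) := by unfold Spec_check; infer_instance

-- ===== CLAIM (what is proved, stated in full; the proofs are below) =====
def Claim_equal_check : Prop := ∀ (a : String) (flag : Int), Dom_check a flag → Spec_check a flag (check a flag)

-- ===== LEMMAS AND PROOFS =====

lemma isPal_stop (f : Nat) (l : List Char) (lo hi : Nat) (h : ¬ lo < hi) :
    isPal f l lo hi = true := by
  cases f with
  | zero => rfl
  | succ f => rw [isPal, if_neg h]

lemma isPal_step_eq (f : Nat) (l : List Char) (lo hi : Nat) (h : lo < hi)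
    (he : l.getD lo ' ' = l.getD hi ' ') :
    isPal (f + 1) l lo hi = isPal f l (lo + 1) (hi - 1) := by
  rw [isPal, if_pos h, if_neg (not_not_intro he)]

lemma isPal_step_ne (f : Nat) (l : List Char) (lo hi : Nat) (h : lo < hi)
    (he : ¬ l.getD lo ' ' = l.getD hi ' ') : isPal (f + 1) l lo hi = false := by
  rw [isPal, if_pos h, if_pos he]

-- element access in "l with index i deleted"
lemma getD_del (l : List Char) (i j : Nat) (hi : i ≤ l.length) :
    (l.take i ++ l.drop (i + 1)).getD j ' ' =
      if j < i then l.getD j ' ' else l.getD (j + 1) ' ' := by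
  unfold List.getD
  by_cases h : j < i
  · rw [List.getElem?_append_left (by simp; omega), List.getElem?_take]
    simp [h]
  · rw [List.getElem?_append_right (by simp; omega), List.getElem?_drop]
    have e : i + 1 + (j - (l.take i).length) = j + 1 := by simp; omega
    rw [e]
    simp [h]

-- A with truthy flag 1 is exactly a palindrome test of the window [i, len-1-i].
lemma checkLoop_one (l : List Char) :
    ∀ fuel f2 i, l.length / 2 - i < fuel → l.length - 1 - i - i < f2 →
      checkLoop fuel l 1 i = if isPal f2 l i (l.length - 1 - i) then 1 else 2 := by
  intro fuel
  induction fuel with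
  | zero => intro f2 i h1 _; omega
  | succ fuel ih =>
    intro f2 i h1 h2
    rw [checkLoop]
    by_cases hl : i < l.length / 2
    · rw [if_pos hl]
      have hlt : i < l.length - 1 - i := by omega
      have e : l.length - i - 1 = l.length - 1 - i := by omega
      rw [e]
      by_cases hm : l.getD i ' ' = l.getD (l.length - 1 - i) ' '
      · rw [if_neg (not_not_intro hm)]
        cases f2 with
        | zero => omega
        | succ f2 =>
          rw [isPal_step_eq _ _ _ _ hlt hm, ih f2 (i + 1) (by omega) (by omega)]
          have e2 : l.length - 1 - i - 1 = l.length - 1 - (i + 1) := by omega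
          rw [e2]
      · rw [if_pos hm, if_neg (by decide : ¬ (1 : Int) = 0)]
        cases f2 with
        | zero => omega
        | succ f2 =>
          rw [isPal_step_ne _ _ _ _ hlt hm]
          simp
    · rw [if_neg hl, isPal_stop _ _ _ _ (by omega), if_pos rfl]

-- b = delete index i, scanning above i: shift indices by one.
lemma isPal_del_high (l : List Char) (i : Nat) (hil : i ≤ l.length) :
    ∀ n lo hi' f1 f2, hi' - lo ≤ n → hi' - lo < f1 → hi' - lo < f2 → i ≤ lo →
      isPal f1 (l.take i ++ l.drop (i + 1)) lo hi' = isPal f2 l (lo + 1) (hi' + 1) := by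
  intro n
  induction n with
  | zero =>
    intro lo hi' f1 f2 hn h1 h2 hlo
    rw [isPal_stop _ _ _ _ (by omega), isPal_stop _ _ _ _ (by omega)]
  | succ n ih =>
    intro lo hi' f1 f2 hn h1 h2 hlo
    by_cases h : lo < hi'
    · cases f1 with
      | zero => omega
      | succ f1 =>
        cases f2 with
        | zero => omega
        | succ f2 =>
          have g1 := getD_del l i lo hil
          have g2 := getD_del l i hi' hil
          rw [if_neg (by omega)] at g1
          rw [if_neg (by omega)] at g2
          by_cases hm : l.getD (lo + 1) ' ' = l.getD (hi' + 1) ' '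
          · rw [isPal_step_eq _ _ _ _ h (by rw [g1, g2]; exact hm),
              isPal_step_eq _ _ _ _ (by omega) hm,
              ih (lo + 1) (hi' - 1) f1 f2 (by omega) (by omega) (by omega) (by omega)]
            congr 1
            omega
          · rw [isPal_step_ne _ _ _ _ h (by rw [g1, g2]; exact hm),
              isPal_step_ne _ _ _ _ (by omega) hm]
    · rw [isPal_stop _ _ _ _ h, isPal_stop _ _ _ _ (by omega)]

-- b = delete index i: palindrome test of b from lo ≤ i equals the window test on l,
-- given the already-matched prefix H.
lemma isPal_del_main (l : List Char) (i : Nat) (hhalf : i < l.length / 2)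
    (H : ∀ j, j < i → l.getD j ' ' = l.getD (l.length - 1 - j) ' ') :
    ∀ m lo f1 f2, i - lo ≤ m → lo ≤ i → l.length - 2 - lo - lo < f1 →
      l.length - 1 - i - (i + 1) < f2 →
      isPal f1 (l.take i ++ l.drop (i + 1)) lo (l.length - 2 - lo) =
        isPal f2 l (i + 1) (l.length - 1 - i) := by
  have hil : i ≤ l.length := by omega
  intro m
  induction m with
  | zero =>
    intro lo f1 f2 hm hlo h1 h2
    have hli : lo = i := by omega
    rw [hli]
    rw [isPal_del_high l i hil (l.length - 2 - i) i (l.length - 2 - i) f1 f2 (by omega)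
      (by omega) (by omega) (le_refl _)]
    congr 1
    omega
  | succ m ih =>
    intro lo f1 f2 hm hlo h1 h2
    by_cases hlt : lo < i
    · have h : lo < l.length - 2 - lo := by omega
      cases f1 with
      | zero => omega
      | succ f1 =>
        have g1 := getD_del l i lo hil
        have g2 := getD_del l i (l.length - 2 - lo) hil
        rw [if_pos hlt] at g1
        rw [if_neg (by omega)] at g2
        have e3 : l.length - 2 - lo + 1 = l.length - 1 - lo := by omega
        rw [e3] at g2
        have hmatch : l.getD lo ' ' = l.getD (l.length - 1 - lo) ' ' := H lo hlt
        rw [isPal_step_eq _ _ _ _ h (by rw [g1, g2]; exact hmatch)]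
        have e4 : l.length - 2 - lo - 1 = l.length - 2 - (lo + 1) := by omega
        rw [e4]
        exact ih (lo + 1) f1 f2 (by omega) (by omega) (by omega) (by omega)
    · have hli : lo = i := by omega
      rw [hli]
      exact ih i f1 f2 (by omega) (le_refl _) (by omega) (by omega)

-- c = delete index len-1-i, scanning strictly below the deleted index: identity on indices.
lemma isPal_del_low (l : List Char) (i : Nat) (hhalf : i < l.length / 2) :
    ∀ n lo hi' f1 f2, hi' - lo ≤ n → hi' - lo < f1 → hi' - lo < f2 →
      hi' < l.length - 1 - i →
      isPal f1 (l.take (l.length - i - 1) ++ l.drop (l.length - i)) lo hi' =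
        isPal f2 l lo hi' := by
  have hil : l.length - i - 1 ≤ l.length := by omega
  have hc : ∀ j, (l.take (l.length - i - 1) ++ l.drop (l.length - i)).getD j ' ' =
      if j < l.length - i - 1 then l.getD j ' ' else l.getD (j + 1) ' ' := by
    intro j
    have g := getD_del l (l.length - i - 1) j hil
    have e : l.length - i - 1 + 1 = l.length - i := by omega
    rw [e] at g
    exact g
  intro n
  induction n with
  | zero =>
    intro lo hi' f1 f2 hn h1 h2 hb
    rw [isPal_stop _ _ _ _ (by omega), isPal_stop _ _ _ _ (by omega)]
  | succ n ih =>
    intro lo hi' f1 f2 hn h1 h2 hb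
    by_cases h : lo < hi'
    · cases f1 with
      | zero => omega
      | succ f1 =>
        cases f2 with
        | zero => omega
        | succ f2 =>
          have g1 := hc lo
          have g2 := hc hi'
          rw [if_pos (by omega)] at g1
          rw [if_pos (by omega)] at g2
          by_cases hm : l.getD lo ' ' = l.getD hi' ' '
          · rw [isPal_step_eq _ _ _ _ h (by rw [g1, g2]; exact hm),
              isPal_step_eq _ _ _ _ h hm]
            exact ih (lo + 1) (hi' - 1) f1 f2 (by omega) (by omega) (by omega) (by omega)
          · rw [isPal_step_ne _ _ _ _ h (by rw [g1, g2]; exact hm),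
              isPal_step_ne _ _ _ _ h hm]
    · rw [isPal_stop _ _ _ _ h, isPal_stop _ _ _ _ h]

-- c = delete index len-1-i: palindrome test of c from lo ≤ i equals the window test on l.
lemma isPal_del_c_main (l : List Char) (i : Nat) (hhalf : i < l.length / 2)
    (H : ∀ j, j < i → l.getD j ' ' = l.getD (l.length - 1 - j) ' ') :
    ∀ m lo f1 f2, i - lo ≤ m → lo ≤ i → l.length - 2 - lo - lo < f1 →
      l.length - 2 - i - i < f2 →
      isPal f1 (l.take (l.length - i - 1) ++ l.drop (l.length - i)) lo (l.length - 2 - lo) =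
        isPal f2 l i (l.length - 2 - i) := by
  have hil : l.length - i - 1 ≤ l.length := by omega
  have hc : ∀ j, (l.take (l.length - i - 1) ++ l.drop (l.length - i)).getD j ' ' =
      if j < l.length - i - 1 then l.getD j ' ' else l.getD (j + 1) ' ' := by
    intro j
    have g := getD_del l (l.length - i - 1) j hil
    have e : l.length - i - 1 + 1 = l.length - i := by omega
    rw [e] at g
    exact g
  intro m
  induction m with
  | zero =>
    intro lo f1 f2 hm hlo h1 h2
    have hli : lo = i := by omega
    rw [hli]
    exact isPal_del_low l i hhalf (l.length - 2 - i - i) i (l.length - 2 - i) f1 f2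
      (by omega) (by omega) (by omega) (by omega)
  | succ m ih =>
    intro lo f1 f2 hm hlo h1 h2
    by_cases hlt : lo < i
    · have h : lo < l.length - 2 - lo := by omega
      cases f1 with
      | zero => omega
      | succ f1 =>
        have g1 := hc lo
        have g2 := hc (l.length - 2 - lo)
        rw [if_pos (by omega)] at g1
        rw [if_neg (by omega)] at g2
        have e3 : l.length - 2 - lo + 1 = l.length - 1 - lo := by omega
        rw [e3] at g2
        have hmatch : l.getD lo ' ' = l.getD (l.length - 1 - lo) ' ' := H lo hlt
        rw [isPal_step_eq _ _ _ _ h (by rw [g1, g2]; exact hmatch)]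
        have e4 : l.length - 2 - lo - 1 = l.length - 2 - (lo + 1) := by omega
        rw [e4]
        exact ih (lo + 1) f1 f2 (by omega) (by omega) (by omega) (by omega)
    · have hli : lo = i := by omega
      rw [hli]
      exact ih i f1 f2 (by omega) (le_refl _) (by omega) (by omega)

lemma main_loop (l : List Char) (flag : Int) :
    ∀ fuel f2 i, l.length - i < fuel → l.length / 2 - i < f2 →
      (∀ j, j < i → l.getD j ' ' = l.getD (l.length - 1 - j) ' ') →
      checkLoop fuel l flag i = altLoop f2 l flag i (l.length - 1 - i) := by
  intro fuel
  induction fuel with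
  | zero => intro f2 i h1 _ _; omega
  | succ fuel ih =>
    intro f2 i h1 h2 H
    cases f2 with
    | zero => omega
    | succ f2 =>
      rw [checkLoop, altLoop]
      by_cases hl : i < l.length / 2
      · have hlt : i < l.length - 1 - i := by omega
        have e : l.length - i - 1 = l.length - 1 - i := by omega
        rw [if_pos hl, if_pos hlt, e]
        by_cases hm : l.getD i ' ' = l.getD (l.length - 1 - i) ' '
        · rw [if_neg (not_not_intro hm), if_neg (not_not_intro hm)]
          have e2 : l.length - 1 - i - 1 = l.length - 1 - (i + 1) := by omega
          rw [e2]
          apply ih f2 (i + 1) (by omega) (by omega)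
          intro j hj
          rcases Nat.lt_or_ge j i with hji | hji
          · exact H j hji
          · have hje : j = i := by omega
            rw [hje]
            exact hm
        · rw [if_pos hm, if_pos hm]
          by_cases hf : flag = 0
          · rw [if_pos hf, if_pos hf]
            have hlenb : (l.take i ++ l.drop (i + 1)).length = l.length - 1 := by
              simp; omega
            have hb := checkLoop_one (l.take i ++ l.drop (i + 1)) fuel
              (l.length - 2 - 0 - 0 + 1) 0
              (by rw [hlenb]; omega) (by rw [hlenb]; omega)
            rw [hlenb, show l.length - 1 - 1 - 0 = l.length - 2 - 0 from by omega,
              isPal_del_main l i hl H i 0 (l.length - 2 - 0 - 0 + 1)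
                (l.length - 1 - i - (i + 1) + 1) (by omega) (by omega) (by omega)
                (by omega)] at hb
            have hlenc : (l.take (l.length - i - 1) ++ l.drop (l.length - i)).length =
                l.length - 1 := by
              simp; omega
            have hcl := checkLoop_one (l.take (l.length - i - 1) ++ l.drop (l.length - i))
              fuel (l.length - 2 - 0 - 0 + 1) 0
              (by rw [hlenc]; omega) (by rw [hlenc]; omega)
            rw [hlenc, show l.length - 1 - 1 - 0 = l.length - 2 - 0 from by omega,
              isPal_del_c_main l i hl H i 0 (l.length - 2 - 0 - 0 + 1)
                (l.length - 2 - i - i + 1) (by omega) (by omega) (by omega)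
                (by omega)] at hcl
            rw [e] at hcl
            rw [hb, hcl]
            have e3 : l.length - 1 - i - 1 = l.length - 2 - i := by omega
            rw [e3]
            by_cases p1 : isPal (l.length - 1 - i - (i + 1) + 1) l (i + 1)
                (l.length - 1 - i) = true <;>
              by_cases p2 : isPal (l.length - 2 - i - i + 1) l i (l.length - 2 - i) = true <;>
                simp [p1, p2]
          · rw [if_neg hf, if_neg hf]
      · rw [if_neg hl, if_neg (by omega)]

-- ===== VERDICT (by name: the statement is the Claim_ definition above) =====
theorem check_spec : Claim_equal_check := by
  intro a flag _
  unfold Spec_check check check_alt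
  have h := main_loop a.toList flag (a.toList.length + 1) (a.toList.length / 2 + 1) 0
    (by omega) (by omega) (by intro j hj; omega)
  simpa using h
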